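-- pv_equiv track=rewrite | github.com/buk0vec/rmc | TransientDetction/test/simple_run.py | groupConsecutiveBlocks
-- ===== SOURCE A (Python) =====
-- def groupConsecutiveBlocks(blockList):
--     """Returns only the first block of each consecutive group"""
--     if len(blockList) == 0:
--         return []
--     groups = [[blockList[0]]]
--     for block in blockList[1:]:
--         if block - groups[-1][-1] == 1:
--             groups[-1].append(block)
--         else:
--             groups.append([block])
--     return [group[0] for group in groups]
-- ===== SOURCE B (Python) =====
-- def groupConsecutiveBlocks(blockList):
--     """Returns only the first block of each consecutive group"""
--     if not blockList:
--         return []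
--     result = [blockList[0]]
--     prev = blockList[0]
--     for block in blockList[1:]:
--         if block - prev != 1:
--             result.append(block)
--         prev = block
--     return result
-- ===== Notes on version B (the rewrite author's own statement) =====
-- stated objective: simpler
-- what changed: Drops the list-of-lists grouping: a single pass keeps only the previous value and appends a block directly when it does not continue the run, instead of materializing every group and projecting the heads afterwards.
import Mathlib
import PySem

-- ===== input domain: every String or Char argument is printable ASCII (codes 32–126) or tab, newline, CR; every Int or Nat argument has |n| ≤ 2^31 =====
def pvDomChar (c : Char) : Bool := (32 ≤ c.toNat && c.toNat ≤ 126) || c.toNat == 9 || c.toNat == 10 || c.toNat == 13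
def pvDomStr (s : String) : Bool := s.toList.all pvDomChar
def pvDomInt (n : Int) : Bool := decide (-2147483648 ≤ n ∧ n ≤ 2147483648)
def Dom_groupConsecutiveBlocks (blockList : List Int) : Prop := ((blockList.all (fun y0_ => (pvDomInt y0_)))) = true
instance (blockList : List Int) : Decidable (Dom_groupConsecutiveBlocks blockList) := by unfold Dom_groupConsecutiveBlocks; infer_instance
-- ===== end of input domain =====

-- B replaces A's list-of-lists grouping by a single pass that keeps only the
-- previous value and appends run starters directly (objective: simpler).

-- ===== PORT A =====
-- groups[-1][-1]: the last element of the last group (the loop invariant keeps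
-- the last group nonempty, so the .getD defaults are never hit)
def pvLastLast (gs : List (List Int)) : Int :=
  (((gs.getLast?).getD []).getLast?).getD 0
-- groups[-1].append(block)
def pvAppendLast (gs : List (List Int)) (b : Int) : List (List Int) :=
  gs.dropLast ++ [((gs.getLast?).getD []) ++ [b]]
-- group[0] (every group is nonempty, so the default is never hit)
def pvHead (g : List Int) : Int := g.headD 0

def groupConsecutiveBlocks (blockList : List Int) : List Int :=
  match blockList with
  | [] => []
  | b0 :: rest =>
    let groups := rest.foldl
      (fun gs block =>
        if block - pvLastLast gs == 1 then pvAppendLast gs block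
        else gs ++ [[block]]) [[b0]]
    groups.map pvHead

-- ===== PORT B =====
-- the loop: state = (result, prev)
def pvAltStep (st : List Int × Int) (block : Int) : List Int × Int :=
  (if block - st.2 ≠ 1 then st.1 ++ [block] else st.1, block)

def groupConsecutiveBlocks_alt (blockList : List Int) : List Int :=
  match blockList with
  | [] => []
  | b0 :: rest => (rest.foldl pvAltStep ([b0], b0)).1

-- ===== PRECONDITION & SPEC =====
def Spec_groupConsecutiveBlocks (blockList : List Int) (out : List Int) : Prop := out = groupConsecutiveBlocks_alt blockList
instance (blockList : List Int) (out : List Int) : Decidable (Spec_groupConsecutiveBlocks blockList out) := by unfold Spec_groupConsecutiveBlocks; infer_instance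

-- ===== CLAIM (what is proved, stated in full; the proofs are below) =====
def Claim_equal_groupConsecutiveBlocks : Prop := ∀ (blockList : List Int), Dom_groupConsecutiveBlocks blockList → Spec_groupConsecutiveBlocks blockList (groupConsecutiveBlocks blockList)

-- ===== LEMMAS AND PROOFS =====

-- loop invariant: the groups state has shape init ++ [g ++ [x]] (last group
-- nonempty, last element x); mapping heads of A's final state equals B's state
theorem pv_main (rest : List Int) : ∀ (init : List (List Int)) (g : List Int) (x : Int) (res : List Int),
    (init ++ [g ++ [x]]).map pvHead = res →
    (rest.foldl
      (fun gs block =>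
        if block - pvLastLast gs == 1 then pvAppendLast gs block
        else gs ++ [[block]]) (init ++ [g ++ [x]])).map pvHead
      = (rest.foldl pvAltStep (res, x)).1 := by
  induction rest with
  | nil => intro init g x res h; simpa using h
  | cons b bs ih =>
    intro init g x res h
    have hll : pvLastLast (init ++ [g ++ [x]]) = x := by
      simp [pvLastLast]
    have hal : pvAppendLast (init ++ [g ++ [x]]) b = init ++ [(g ++ [x]) ++ [b]] := by
      simp [pvAppendLast]
    simp only [List.foldl_cons, hll, pvAltStep]
    by_cases hb : b - x = 1
    · simp only [hb, hal, beq_self_eq_true, if_true]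
      exact ih init (g ++ [x]) b res (by
        rw [← h]; simp; cases g <;> simp [pvHead])
    · have hb' : ¬ ((b - x == 1) = true) := by simpa using hb
      simp only [if_neg hb', if_pos hb]
      have h2 : (init ++ [g ++ [x]]) ++ [[b]] = (init ++ [g ++ [x]]) ++ [([] : List Int) ++ [b]] := by simp
      rw [h2]
      have h3 := ih (init ++ [g ++ [x]]) [] b (res ++ [b]) (by rw [← h]; simp [pvHead])
      simpa [List.append_assoc] using h3

-- ===== VERDICT (by name: the statement is the Claim_ definition above) =====
theorem groupConsecutiveBlocks_spec : Claim_equal_groupConsecutiveBlocks := by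
  intro blockList _
  unfold Spec_groupConsecutiveBlocks groupConsecutiveBlocks groupConsecutiveBlocks_alt
  cases blockList with
  | nil => rfl
  | cons b0 rest =>
    simpa using pv_main rest [] [] b0 [b0] (by simp [pvHead])
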